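-- pv_equiv track=rewrite | github.com/Ricardodavilaoficial/eu-digital | services/bot_handlers/sales_lead.py | _pt_int
-- ===== SOURCE A (Python) =====
-- def _pt_int(n: int) -> str:
--     """Inteiro pt-BR bem simples (0–999). Suficiente para preços/GB/dias."""
--     n = int(n)
--     units = ["zero","um","dois","três","quatro","cinco","seis","sete","oito","nove"]
--     teens = ["dez","onze","doze","treze","quatorze","quinze","dezesseis","dezessete","dezoito","dezenove"]
--     tens = ["","", "vinte","trinta","quarenta","cinquenta","sessenta","setenta","oitenta","noventa"]
--     hundreds = ["","cento","duzentos","trezentos","quatrocentos","quinhentos","seiscentos","setecentos","oitocentos","novecentos"]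
--
--     if n < 0:
--         return "menos " + _pt_int(-n)
--     if n < 10:
--         return units[n]
--     if n < 20:
--         return teens[n - 10]
--     if n < 100:
--         d, r = divmod(n, 10)
--         return tens[d] if r == 0 else f"{tens[d]} e {units[r]}"
--     if n == 100:
--         return "cem"
--     if n < 1000:
--         c, r = divmod(n, 100)
--         if r == 0:
--             return hundreds[c]
--         return f"{hundreds[c]} e {_pt_int(r)}"
--     return str(n)
-- ===== SOURCE B (Python) =====
-- def _words(n: int) -> str:
--     """Words for a nonnegative int: token list joined with ' e '."""
--     units = ["zero","um","dois","três","quatro","cinco","seis","sete","oito","nove"]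
--     teens = ["dez","onze","doze","treze","quatorze","quinze","dezesseis","dezessete","dezoito","dezenove"]
--     tens = ["","", "vinte","trinta","quarenta","cinquenta","sessenta","setenta","oitenta","noventa"]
--     hundreds = ["","cento","duzentos","trezentos","quatrocentos","quinhentos","seiscentos","setecentos","oitocentos","novecentos"]
--     if n >= 1000:
--         return str(n)
--     if n == 100:
--         return "cem"
--     c, r = divmod(n, 100)
--     parts = []
--     if c:
--         parts.append(hundreds[c])
--     if 10 <= r < 20:
--         parts.append(teens[r - 10])
--     else:
--         d, u = divmod(r, 10)
--         if d:
--             parts.append(tens[d])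
--         if u or not parts:
--             parts.append(units[u])
--     return " e ".join(parts)
--
--
-- def _pt_int(n: int) -> str:
--     n = int(n)
--     if n < 0:
--         return "menos " + _words(-n)
--     return _words(n)
-- ===== Notes on version B (the rewrite author's own statement) =====
-- stated objective: simpler
-- what changed: Replaces A's recursive range-by-range branch chain (with recursive calls for the sign and the sub-hundred remainder) by a single non-recursive pass: strip the sign into a prefix, split the sub-thousand value into hundreds/teens/tens/units, collect the non-empty word tokens in a list and join them with ' e '.
import Mathlib
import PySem

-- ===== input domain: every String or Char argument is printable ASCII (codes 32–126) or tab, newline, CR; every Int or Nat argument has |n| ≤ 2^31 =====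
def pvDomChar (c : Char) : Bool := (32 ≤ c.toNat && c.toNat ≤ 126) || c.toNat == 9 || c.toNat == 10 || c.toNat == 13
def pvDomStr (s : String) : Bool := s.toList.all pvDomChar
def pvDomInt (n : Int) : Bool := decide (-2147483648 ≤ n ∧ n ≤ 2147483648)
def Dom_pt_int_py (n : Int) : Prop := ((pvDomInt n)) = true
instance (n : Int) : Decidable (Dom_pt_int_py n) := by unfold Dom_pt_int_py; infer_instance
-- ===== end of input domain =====

-- B replaces A's branch-per-range recursion by a sign prefix plus a non-recursive token-list build joined with " e " (objective: simpler decomposition, same cost).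

-- ===== PORT A =====
-- Literal port of A's recursive branch chain. List indexing is ported with
-- PySem.List.pyGetD (default ""); every index A uses is in range, so this is exact.
def pt_int_py (n : Int) : String :=
  let units : List String := ["zero","um","dois","três","quatro","cinco","seis","sete","oito","nove"]
  let teens : List String := ["dez","onze","doze","treze","quatorze","quinze","dezesseis","dezessete","dezoito","dezenove"]
  let tens : List String := ["","", "vinte","trinta","quarenta","cinquenta","sessenta","setenta","oitenta","noventa"]
  let hundreds : List String := ["","cento","duzentos","trezentos","quatrocentos","quinhentos","seiscentos","setecentos","oitocentos","novecentos"]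
  if n < 0 then "menos " ++ pt_int_py (-n)
  else if n < 10 then PySem.List.pyGetD units n ""
  else if n < 20 then PySem.List.pyGetD teens (n - 10) ""
  else if n < 100 then
    let d := PySem.Int.floordiv n 10
    let r := PySem.Int.mod n 10
    if r = 0 then PySem.List.pyGetD tens d ""
    else PySem.List.pyGetD tens d "" ++ " e " ++ PySem.List.pyGetD units r ""
  else if n = 100 then "cem"
  else if n < 1000 then
    let c := PySem.Int.floordiv n 100
    let r := PySem.Int.mod n 100
    if r = 0 then PySem.List.pyGetD hundreds c ""
    else PySem.List.pyGetD hundreds c "" ++ " e " ++ pt_int_py r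
  else PySem.Int.toStr n
termination_by 2 * n.natAbs + (if n < 0 then 1 else 0)
decreasing_by
  · simp only [Int.natAbs_neg]
    split_ifs <;> omega
  · have h0 : (0:Int) < 100 := by omega
    have h1 := PySem.Int.mod_nonneg n h0
    have h2 := PySem.Int.mod_lt n h0
    split_ifs <;> omega

-- ===== PORT B =====
-- Port of Source B's helper _words: flat token list for a nonnegative int, joined with " e ".
def ptWords (n : Int) : String :=
  let units : List String := ["zero","um","dois","três","quatro","cinco","seis","sete","oito","nove"]
  let teens : List String := ["dez","onze","doze","treze","quatorze","quinze","dezesseis","dezessete","dezoito","dezenove"]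
  let tens : List String := ["","", "vinte","trinta","quarenta","cinquenta","sessenta","setenta","oitenta","noventa"]
  let hundreds : List String := ["","cento","duzentos","trezentos","quatrocentos","quinhentos","seiscentos","setecentos","oitocentos","novecentos"]
  if 1000 ≤ n then PySem.Int.toStr n
  else if n = 100 then "cem"
  else
    let c := PySem.Int.floordiv n 100
    let r := PySem.Int.mod n 100
    let parts : List String := if c ≠ 0 then [PySem.List.pyGetD hundreds c ""] else []
    let parts :=
      if 10 ≤ r ∧ r < 20 then parts ++ [PySem.List.pyGetD teens (r - 10) ""]
      else
        let d := PySem.Int.floordiv r 10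
        let u := PySem.Int.mod r 10
        let parts := if d ≠ 0 then parts ++ [PySem.List.pyGetD tens d ""] else parts
        if u ≠ 0 ∨ parts = [] then parts ++ [PySem.List.pyGetD units u ""] else parts
    PySem.Str.join " e " parts

-- Port of Source B's _pt_int: sign prefix in front of the words for |n|.
def pt_int_py_alt (n : Int) : String :=
  if n < 0 then "menos " ++ ptWords (-n) else ptWords n

-- ===== PRECONDITION & SPEC =====
def Spec_pt_int_py (n : Int) (out : String) : Prop := out = pt_int_py_alt n
instance (n : Int) (out : String) : Decidable (Spec_pt_int_py n out) := by unfold Spec_pt_int_py; infer_instance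

-- ===== CLAIM (what is proved, stated in full; the proofs are below) =====
def Claim_equal_pt_int_py : Prop := ∀ (n : Int), Dom_pt_int_py n → Spec_pt_int_py n (pt_int_py n)

-- ===== LEMMAS AND PROOFS =====

-- B's token list for the sub-hundred remainder r, with the hundreds prefix p already collected.
def toksMid (p : List String) (r : Int) : List String :=
  if PySem.Int.floordiv r 10 ≠ 0 then p ++ [PySem.List.pyGetD ["","", "vinte","trinta","quarenta","cinquenta","sessenta","setenta","oitenta","noventa"] (PySem.Int.floordiv r 10) ""] else p

def toks (p : List String) (r : Int) : List String :=
  if 10 ≤ r ∧ r < 20 then p ++ [PySem.List.pyGetD ["dez","onze","doze","treze","quatorze","quinze","dezesseis","dezessete","dezoito","dezenove"] (r - 10) ""]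
  else
    if PySem.Int.mod r 10 ≠ 0 ∨ toksMid p r = [] then toksMid p r ++ [PySem.List.pyGetD ["zero","um","dois","três","quatro","cinco","seis","sete","oito","nove"] (PySem.Int.mod r 10) ""] else toksMid p r

theorem fd_small (a b : Int) (h0 : 0 ≤ a) (h : a < b) : PySem.Int.floordiv a b = 0 :=
  (PySem.Int.floordiv_eq_iff_of_pos (by omega)).mpr ⟨by omega, by omega⟩

theorem md_small (a b : Int) (h0 : 0 ≤ a) (h : a < b) : PySem.Int.mod a b = a := by
  have h1 := PySem.Int.floordiv_mul_add_mod a b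
  rw [fd_small a b h0 h] at h1
  omega

theorem join_singleton (a : String) : PySem.Str.join " e " [a] = a := by
  simp [PySem.Str.join]

theorem join_cons (a b : String) (t : List String) :
    PySem.Str.join " e " (a :: b :: t) = a ++ " e " ++ PySem.Str.join " e " (b :: t) := by
  apply String.toList_inj.mp
  simp [PySem.Str.join, PySem.Chars.join_cons_cons]

theorem toks_ne_nil (p : List String) (r : Int) : toks p r ≠ [] := by
  rw [toks]
  split_ifs with h1 h2
  · simp
  · simp
  · exact fun hnil => h2 (Or.inr hnil)

theorem join_cons' (a : String) (ps : List String) (h : ps ≠ []) :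
    PySem.Str.join " e " (a :: ps) = a ++ " e " ++ PySem.Str.join " e " ps := by
  cases ps with
  | nil => exact absurd rfl h
  | cons b t => exact join_cons a b t

-- Hundreds prefix distributes over the sub-hundred tokens when the remainder is nonzero.
theorem toksMid_prefix (x : String) (r : Int) (hd : PySem.Int.floordiv r 10 ≠ 0) :
    toksMid [x] r = x :: toksMid [] r := by
  rw [toksMid, toksMid, if_pos hd, if_pos hd]
  rfl

theorem toks_prefix (x : String) (r : Int) (h0 : 0 < r) (h : r < 100) :
    toks [x] r = x :: toks [] r := by
  have hd0 := PySem.Int.floordiv_mul_add_mod r 10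
  rw [toks, toks]
  by_cases ht : 10 ≤ r ∧ r < 20
  · rw [if_pos ht, if_pos ht]
    rfl
  · rw [if_neg ht, if_neg ht]
    by_cases hd : PySem.Int.floordiv r 10 = 0
    · have hu : PySem.Int.mod r 10 ≠ 0 := by omega
      have hm1 : toksMid [x] r = [x] := by rw [toksMid, if_neg (by simpa using hd)]
      have hm2 : toksMid ([] : List String) r = [] := by rw [toksMid, if_neg (by simpa using hd)]
      rw [hm1, hm2, if_pos (Or.inl hu), if_pos (Or.inr rfl)]
      rfl
    · rw [toksMid_prefix x r hd]
      have hm2 : toksMid ([] : List String) r ≠ [] := by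
        rw [toksMid, if_pos hd]; simp
      by_cases hu : PySem.Int.mod r 10 = 0
      · rw [if_neg (not_or.mpr ⟨fun a => a hu, List.cons_ne_nil _ _⟩),
          if_neg (not_or.mpr ⟨fun a => a hu, hm2⟩)]
      · rw [if_pos (Or.inl hu), if_pos (Or.inl hu)]
        rfl

-- ptWords on 0 ≤ n < 1000, n ≠ 100 is the joined token list.
theorem ptWords_toks (n : Int) (h0 : 0 ≤ n) (h : n < 1000) (h100 : n ≠ 100) :
    ptWords n = PySem.Str.join " e "
      (toks (if PySem.Int.floordiv n 100 ≠ 0 then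
               [PySem.List.pyGetD ["","cento","duzentos","trezentos","quatrocentos","quinhentos","seiscentos","setecentos","oitocentos","novecentos"] (PySem.Int.floordiv n 100) ""]
             else []) (PySem.Int.mod n 100)) := by
  rw [ptWords]
  simp only [if_neg (by omega : ¬ 1000 ≤ n), if_neg h100]
  rfl

-- A on 0 ≤ n < 100 equals the joined token list with empty prefix.
theorem Wsmall (n : Int) (h0 : 0 ≤ n) (h : n < 100) :
    pt_int_py n = PySem.Str.join " e " (toks [] n) := by
  rw [pt_int_py]
  simp only [if_neg (by omega : ¬ n < 0)]
  by_cases h10 : n < 10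
  · have hd : PySem.Int.floordiv n 10 = 0 := fd_small n 10 h0 h10
    have hu : PySem.Int.mod n 10 = n := md_small n 10 h0 h10
    have hm : toksMid ([] : List String) n = [] := by
      rw [toksMid, if_neg (by simpa using hd)]
    rw [if_pos h10, toks, if_neg (by omega : ¬ (10 ≤ n ∧ n < 20)), if_pos (Or.inr hm), hm,
      List.nil_append, hu, join_singleton]
  · by_cases h20 : n < 20
    · rw [if_neg h10, if_pos h20, toks, if_pos (by omega : 10 ≤ n ∧ n < 20),
        List.nil_append, join_singleton]
    · have hd2 : 2 ≤ PySem.Int.floordiv n 10 :=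
        (PySem.Int.le_floordiv_iff_mul_le (by omega)).mpr (by omega)
      have hm : toksMid ([] : List String) n =
          [PySem.List.pyGetD ["","", "vinte","trinta","quarenta","cinquenta","sessenta","setenta","oitenta","noventa"] (PySem.Int.floordiv n 10) ""] := by
        rw [toksMid, if_pos (by omega : PySem.Int.floordiv n 10 ≠ 0), List.nil_append]
      rw [if_neg h10, if_neg h20, if_pos h, toks, if_neg (by omega : ¬ (10 ≤ n ∧ n < 20)), hm]
      by_cases hu : PySem.Int.mod n 10 = 0
      · rw [if_pos hu, if_neg (not_or.mpr ⟨fun a => a hu, List.cons_ne_nil _ _⟩), join_singleton]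
      · rw [if_neg hu, if_pos (Or.inl hu), List.singleton_append, join_cons, join_singleton]

-- A equals ptWords on every nonnegative input.
theorem Wfull (n : Int) (h0 : 0 ≤ n) : pt_int_py n = ptWords n := by
  by_cases hbig : 1000 ≤ n
  · rw [pt_int_py, ptWords]
    simp only [if_neg (by omega : ¬ n < 0), if_neg (by omega : ¬ n < 10),
      if_neg (by omega : ¬ n < 20), if_neg (by omega : ¬ n < 100),
      if_neg (by omega : n ≠ 100), if_neg (by omega : ¬ n < 1000), if_pos hbig]
  · by_cases h100lt : n < 100
    · rw [Wsmall n h0 h100lt]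
      by_cases h100 : n = 100
      · omega
      · rw [ptWords_toks n h0 (by omega) h100,
          fd_small n 100 h0 h100lt, md_small n 100 h0 h100lt]
        simp
    · by_cases h100 : n = 100
      · subst h100
        rw [pt_int_py, ptWords]
        norm_num
      · -- 100 < n < 1000
        have hc1 : 1 ≤ PySem.Int.floordiv n 100 :=
          (PySem.Int.le_floordiv_iff_mul_le (by omega)).mpr (by omega)
        have hr0 := PySem.Int.mod_nonneg n (by omega : (0:Int) < 100)
        have hr1 := PySem.Int.mod_lt n (by omega : (0:Int) < 100)
        rw [pt_int_py, ptWords_toks n h0 (by omega) h100]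
        simp only [if_neg (by omega : ¬ n < 0), if_neg (by omega : ¬ n < 10),
          if_neg (by omega : ¬ n < 20), if_neg (by omega : ¬ n < 100),
          if_neg h100, if_pos (by omega : n < 1000),
          if_pos (by omega : PySem.Int.floordiv n 100 ≠ 0)]
        by_cases hr : PySem.Int.mod n 100 = 0
        · have hu : PySem.Int.mod (0:Int) 10 = 0 := md_small 0 10 le_rfl (by omega)
          have hm : ∀ p : List String, toksMid p 0 = p := fun p => by
            rw [toksMid, if_neg (by simp)]
          rw [if_pos hr, hr, toks, if_neg (by omega : ¬ ((10:Int) ≤ 0 ∧ (0:Int) < 20)), hm,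
            if_neg (not_or.mpr ⟨fun a => a hu, List.cons_ne_nil _ _⟩), join_singleton]
        · rw [if_neg hr, toks_prefix _ _ (by omega) hr1,
            join_cons' _ _ (toks_ne_nil [] _), Wsmall _ hr0 hr1]

-- ===== VERDICT (by name: the statement is the Claim_ definition above) =====
theorem pt_int_py_spec : Claim_equal_pt_int_py := by
  intro n _
  unfold Spec_pt_int_py pt_int_py_alt
  by_cases hn : n < 0
  · rw [if_pos hn, pt_int_py]
    simp only [if_pos hn]
    exact congrArg _ (Wfull (-n) (by omega))
  · rw [if_neg hn]
    exact Wfull n (by omega)
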